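-- pv_equiv track=rewrite | github.com/elkinnarvaez/design-new-capital | solution_using_iterative_fft.py | construct_polynomial
-- ===== SOURCE A (Python) =====
-- def C(n, K):
--     """
--         Description: This function computes the binomial coefficient of C(n, 0), C(n, 1), ... , C(n, K).
--         Input:
--             - n: An integer value greater than zero.
--             - K: An integer value greater than zero and less or equal than n.
--         Output:
--             An array ans[0 .. K], where ans[k] = C(n, k).
--     """
--     ans = [0 for _ in range(K + 1)]
--     ans[0] = 1; ans[K] = 1
--     h = min(K, n//2)
--     for k in range(1, h + 1):
--         ans[k] = ((n - k + 1)*(ans[k - 1])//k)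
--         if(n - k <= K):
--             ans[n - k] = ans[k]
--     return ans
--
-- def construct_polynomial(c1, c2):
--     """
--         Description: This function constructs two polynomials according to the given number of points on each quadrant.
--         Input:
--             - c1: An integer value greater or equal to 0.
--             - c2: An integer value greater or equal to 0.
--         Output:
--             A polynomial in coefficients representation.
--     """
--     K = min(c1, c2)
--     a = C(c1, K)
--     b = C(c2, K)
--     p = [None for _ in range(K + 1)]
--     for i in range(K + 1):
--         p[i] = (a[i]*b[i])
--     return p
-- ===== SOURCE B (Python) =====
-- def construct_polynomial(c1, c2):
--     K = min(c1, c2)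
--     p = [1]
--     for k in range(1, K + 1):
--         p.append(p[-1] * (c1 - k + 1) * (c2 - k + 1) // (k * k))
--     return p
-- ===== Notes on version B (the rewrite author's own statement) =====
-- stated objective: faster
-- what changed: B drops A's helper that builds a full binomial row per argument (incremental half-row recurrence plus C(n,k)=C(n,n-k) symmetry fill, then a pointwise-multiply pass) and instead grows the product row directly in one append loop with the fused recurrence p[k] = p[k-1]*(c1-k+1)*(c2-k+1)//k^2.
import Mathlib
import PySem

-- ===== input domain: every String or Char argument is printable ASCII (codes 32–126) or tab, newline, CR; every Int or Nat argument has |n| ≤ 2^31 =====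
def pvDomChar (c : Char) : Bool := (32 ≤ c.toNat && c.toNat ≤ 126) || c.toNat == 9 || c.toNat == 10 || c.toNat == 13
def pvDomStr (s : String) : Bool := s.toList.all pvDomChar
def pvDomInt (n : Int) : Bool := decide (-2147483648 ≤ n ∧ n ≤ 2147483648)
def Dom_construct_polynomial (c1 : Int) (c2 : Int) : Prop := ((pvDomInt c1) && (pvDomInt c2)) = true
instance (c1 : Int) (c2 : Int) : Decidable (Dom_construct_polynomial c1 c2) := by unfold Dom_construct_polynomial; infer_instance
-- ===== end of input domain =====

-- B drops A's per-argument binomial-row helper (half-row recurrence + symmetry fill,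
-- then a pointwise-multiply pass) and grows the product row in ONE append loop with the
-- fused recurrence p[k] = p[k-1]*(c1-k+1)*(c2-k+1)//k^2; measured faster (constant factor).

-- ===== PORT A =====
-- loop body of A's helper C (the Python mutates `ans` in place; List.set models the
-- index assignments and getD the read ans[k-1] — exact here because on every input
-- admitted by Pre_ all these indices are in range)
def pyCStep (n K : Int) (ans : List Int) (k : Int) : List Int :=
  let v := PySem.Int.floordiv ((n - k + 1) * ans.getD (k - 1).toNat 0) k
  let ans' := ans.set k.toNat v
  if n - k ≤ K then ans'.set (n - k).toNat v else ans'

-- A's helper C(n, K): the row of binomials by the incremental recurrence with symmetry fill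
def pyC (n K : Int) : List Int :=
  let ans := ((List.replicate (K + 1).toNat (0 : Int)).set 0 1).set K.toNat 1
  (PySem.List.pyRange 1 (min K (PySem.Int.floordiv n 2) + 1) 1).foldl (pyCStep n K) ans

def construct_polynomial (c1 : Int) (c2 : Int) : List Int :=
  let K := min c1 c2
  let a := pyC c1 K
  let b := pyC c2 K
  (PySem.List.pyRange 0 (K + 1) 1).map (fun i => a.getD i.toNat 0 * b.getD i.toNat 0)

-- ===== PORT B =====
-- p[-1] is PySem.List.pyGetD p (-1) 0 (exact: p is never empty, so no default is taken)
def construct_polynomial_alt (c1 : Int) (c2 : Int) : List Int :=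
  let K := min c1 c2
  (PySem.List.pyRange 1 (K + 1) 1).foldl
    (fun p k =>
      p ++ [PySem.Int.floordiv (PySem.List.pyGetD p (-1) 0 * (c1 - k + 1) * (c2 - k + 1)) (k * k)])
    [1]

-- ===== PRECONDITION & SPEC =====
-- A raises IndexError whenever min(c1, c2) < 0 (it assigns ans[0] = 1 on a
-- negative-length, i.e. empty, list); Pre_ admits exactly the inputs A returns on.
def Pre_construct_polynomial (c1 : Int) (c2 : Int) : Prop := 0 ≤ c1 ∧ 0 ≤ c2
instance (c1 : Int) (c2 : Int) : Decidable (Pre_construct_polynomial c1 c2) := by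
  unfold Pre_construct_polynomial; infer_instance

def pvWitness_construct_polynomial : Int × Int := (3, 5)

def Spec_construct_polynomial (c1 : Int) (c2 : Int) (out : List Int) : Prop :=
  out = construct_polynomial_alt c1 c2
instance (c1 : Int) (c2 : Int) (out : List Int) : Decidable (Spec_construct_polynomial c1 c2 out) := by
  unfold Spec_construct_polynomial; infer_instance

-- ===== CLAIM =====
def Claim_equal_construct_polynomial : Prop :=
  ∀ (c1 : Int) (c2 : Int), Dom_construct_polynomial c1 c2 →
    Pre_construct_polynomial c1 c2 →
    Spec_construct_polynomial c1 c2 (construct_polynomial c1 c2)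

-- ===== LEMMAS AND PROOFS =====

-- value at index i of A's `ans` after the loop steps k = 1 .. j have run:
-- indices 0..j hold C(N,i) (written directly), indices N-j..N-1 hold C(N,i)
-- (written by the symmetry fill), index Kn holds its initial 1, the rest 0
def pvVal (N Kn j i : Nat) : Int :=
  if i ≤ j then (N.choose i : Int)
  else if N ≤ i + j ∧ i < N then (N.choose i : Int)
  else if i = Kn then 1 else 0

def pvState (N Kn j : Nat) : List Int := (List.range (Kn + 1)).map (fun i => pvVal N Kn j i)

lemma pvState_init (N Kn : Nat) :
    ((List.replicate (Kn + 1) (0 : Int)).set 0 1).set Kn 1 = pvState N Kn 0 := by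
  apply List.ext_getElem
  · simp [pvState]
  intro i h1 h2
  simp only [pvState, List.getElem_map, List.getElem_range]
  simp only [List.getElem_set, List.getElem_replicate]
  unfold pvVal
  split_ifs <;> first
    | rfl
    | omega
    | (have hz : i = 0 := by omega
       subst hz
       simp)

lemma pvStep_eq (N Kn j : Nat) (hKn : Kn ≤ N) (hj : j < min Kn (N / 2)) :
    pyCStep (N : Int) (Kn : Int) (pvState N Kn j) ((j : Int) + 1) = pvState N Kn (j + 1) := by
  have hjN : j + 1 ≤ N := by omega
  have hjK : j + 1 ≤ Kn := by omega
  -- the value read at index k - 1 = j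
  have hread : (pvState N Kn j).getD (((j : Int) + 1 - 1)).toNat 0 = (N.choose j : Int) := by
    have h1 : ((j : Int) + 1 - 1).toNat = j := by omega
    rw [h1]
    have h2 : j < (pvState N Kn j).length := by simp [pvState]; omega
    rw [List.getD_eq_getElem _ _ h2]
    simp [pvState, pvVal]
  -- the value written: ((N - k + 1) * C(N, k-1)) // k = C(N, k) for k = j + 1
  have hv : PySem.Int.floordiv (((N : Int) - ((j : Int) + 1) + 1) * (N.choose j : Int))
      ((j : Int) + 1) = (N.choose (j + 1) : Int) := by
    have h1 : (N : Int) - ((j : Int) + 1) + 1 = ((N - j : Nat) : Int) := by omega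
    have h2 : ((j : Int) + 1) = ((j + 1 : Nat) : Int) := by omega
    rw [h1, h2, ← Nat.cast_mul, PySem.Int.floordiv_natCast]
    have h3 : (N - j) * N.choose j = N.choose (j + 1) * (j + 1) := by
      rw [mul_comm, Nat.choose_succ_right_eq]
    rw [h3, Nat.mul_div_cancel _ (by omega)]
  unfold pyCStep
  simp only [hread, hv]
  have htN : (((j : Int) + 1)).toNat = j + 1 := by omega
  have htS : ((N : Int) - ((j : Int) + 1)).toNat = N - (j + 1) := by omega
  by_cases hc : N - (j + 1) ≤ Kn
  · rw [if_pos (by omega), htN, htS]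
    apply List.ext_getElem
    · simp [pvState]
    intro i hL hR
    have hi : i < Kn + 1 := by simpa [pvState] using hR
    simp only [List.getElem_set, pvState, List.getElem_map, List.getElem_range]
    have hsym : N.choose (N - (j + 1)) = N.choose (j + 1) := Nat.choose_symm hjN
    by_cases e1 : N - (j + 1) = i
    · rw [if_pos e1, ← e1]
      unfold pvVal
      split_ifs <;> first | (rw [hsym]) | omega
    · rw [if_neg e1]
      by_cases e2 : j + 1 = i
      · rw [if_pos e2, ← e2]
        unfold pvVal
        split_ifs <;> first | rfl | omega
      · rw [if_neg e2]
        unfold pvVal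
        split_ifs <;> first | rfl | omega
  · rw [if_neg (by omega), htN]
    apply List.ext_getElem
    · simp [pvState]
    intro i hL hR
    have hi : i < Kn + 1 := by simpa [pvState] using hR
    simp only [List.getElem_set, pvState, List.getElem_map, List.getElem_range]
    by_cases e2 : j + 1 = i
    · rw [if_pos e2, ← e2]
      unfold pvVal
      split_ifs <;> first | rfl | omega
    · rw [if_neg e2]
      unfold pvVal
      split_ifs <;> first | rfl | omega

lemma pvState_final (N Kn : Nat) (hKn : Kn ≤ N) :
    pvState N Kn (min Kn (N / 2)) = (List.range (Kn + 1)).map (fun i => (N.choose i : Int)) := by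
  unfold pvState
  apply List.map_congr_left
  intro i hi
  simp only [List.mem_range] at hi
  unfold pvVal
  split_ifs with h1 h2 h3
  · rfl
  · rfl
  · have hiN : i = N := by omega
    subst hiN
    simp
  · omega

lemma pvLoop_eq (N Kn : Nat) (hKn : Kn ≤ N) (j : Nat) (hj : j ≤ min Kn (N / 2)) :
    (PySem.List.pyRange 1 ((j : Int) + 1) 1).foldl (pyCStep (N : Int) (Kn : Int))
      (pvState N Kn 0) = pvState N Kn j := by
  induction j with
  | zero => rw [PySem.List.pyRange_one_eq_nil (by omega)]; rfl
  | succ m ih =>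
    have h1 : ((m + 1 : Nat) : Int) + 1 = ((m : Int) + 1) + 1 := by push_cast; ring
    rw [h1, PySem.List.pyRange_one_succ_right (by omega), List.foldl_append,
      ih (by omega)]
    simpa using pvStep_eq N Kn m hKn (by omega)

lemma pyC_eq (N Kn : Nat) (hKn : Kn ≤ N) :
    pyC (N : Int) (Kn : Int) = (List.range (Kn + 1)).map (fun i => (N.choose i : Int)) := by
  unfold pyC
  have h1 : ((Kn : Int) + 1).toNat = Kn + 1 := by omega
  have h2 : (Kn : Int).toNat = Kn := by omega
  have h3 : PySem.Int.floordiv (N : Int) 2 = ((N / 2 : Nat) : Int) := by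
    exact_mod_cast PySem.Int.floordiv_natCast N 2
  have h4 : min (Kn : Int) (((N / 2 : Nat) : Int)) = ((min Kn (N / 2) : Nat) : Int) := by
    simp [Nat.cast_min]
  rw [h1, h2, h3, h4, pvState_init N Kn,
    pvLoop_eq N Kn hKn (min Kn (N / 2)) (le_refl _), pvState_final N Kn hKn]

lemma pvGetD_last (xs : List Int) (x : Int) :
    PySem.List.pyGetD (xs ++ [x]) (-1) 0 = x := by
  simp [PySem.List.pyGetD, PySem.List.pyGet?, PySem.List.pyIdx?]

-- B's loop after steps k = 1 .. j holds exactly the first j+1 product coefficients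
lemma pvAltLoop_eq (n1 n2 Kn : Nat) (h1 : Kn ≤ n1) (h2 : Kn ≤ n2) (j : Nat) (hj : j ≤ Kn) :
    (PySem.List.pyRange 1 ((j : Int) + 1) 1).foldl
      (fun p k =>
        p ++ [PySem.Int.floordiv
          (PySem.List.pyGetD p (-1) 0 * ((n1 : Int) - k + 1) * ((n2 : Int) - k + 1)) (k * k)])
      [1]
    = (List.range (j + 1)).map (fun i => ((n1.choose i * n2.choose i : Nat) : Int)) := by
  induction j with
  | zero =>
    rw [PySem.List.pyRange_one_eq_nil (by omega)]
    simp
  | succ m ih =>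
    have hc : ((m + 1 : Nat) : Int) + 1 = ((m : Int) + 1) + 1 := by push_cast; ring
    rw [hc, PySem.List.pyRange_one_succ_right (by omega), List.foldl_append,
      ih (by omega)]
    simp only [List.foldl_cons, List.foldl_nil]
    have hsplit : (List.range (m + 1)).map (fun i => ((n1.choose i * n2.choose i : Nat) : Int))
        = (List.range m).map (fun i => ((n1.choose i * n2.choose i : Nat) : Int))
          ++ [((n1.choose m * n2.choose m : Nat) : Int)] := by
      rw [List.range_succ, List.map_append, List.map_cons, List.map_nil]
    rw [hsplit, pvGetD_last, ← hsplit]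
    -- the appended value is the next product coefficient
    have e1 : (n1 : Int) - ((m : Int) + 1) + 1 = ((n1 - m : Nat) : Int) := by omega
    have e2 : (n2 : Int) - ((m : Int) + 1) + 1 = ((n2 - m : Nat) : Int) := by omega
    have e3 : ((m : Int) + 1) * ((m : Int) + 1) = (((m + 1) * (m + 1) : Nat) : Int) := by
      push_cast; ring
    rw [e1, e2, e3, ← Nat.cast_mul, ← Nat.cast_mul, PySem.Int.floordiv_natCast]
    have harith : n1.choose m * n2.choose m * (n1 - m) * (n2 - m)
        = n1.choose (m + 1) * n2.choose (m + 1) * ((m + 1) * (m + 1)) := by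
      have a1 : n1.choose (m + 1) * (m + 1) = n1.choose m * (n1 - m) :=
        Nat.choose_succ_right_eq n1 m
      have a2 : n2.choose (m + 1) * (m + 1) = n2.choose m * (n2 - m) :=
        Nat.choose_succ_right_eq n2 m
      calc n1.choose m * n2.choose m * (n1 - m) * (n2 - m)
          = (n1.choose m * (n1 - m)) * (n2.choose m * (n2 - m)) := by ring
        _ = (n1.choose (m + 1) * (m + 1)) * (n2.choose (m + 1) * (m + 1)) := by rw [a1, a2]
        _ = n1.choose (m + 1) * n2.choose (m + 1) * ((m + 1) * (m + 1)) := by ring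
    rw [harith, Nat.mul_div_cancel _ (by positivity)]
    rw [List.range_succ (n := m + 1), List.map_append, List.map_cons, List.map_nil]

-- ===== VERDICT =====
theorem construct_polynomial_spec : Claim_equal_construct_polynomial := by
  intro c1 c2 _ hpre
  obtain ⟨h1, h2⟩ := hpre
  unfold Spec_construct_polynomial
  obtain ⟨n1, rfl⟩ : ∃ n : Nat, c1 = (n : Int) := ⟨c1.toNat, by omega⟩
  obtain ⟨n2, rfl⟩ : ∃ n : Nat, c2 = (n : Int) := ⟨c2.toNat, by omega⟩
  unfold construct_polynomial construct_polynomial_alt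
  dsimp only
  have hmin : min (n1 : Int) (n2 : Int) = ((min n1 n2 : Nat) : Int) := by simp [Nat.cast_min]
  rw [hmin, pyC_eq n1 (min n1 n2) (by omega), pyC_eq n2 (min n1 n2) (by omega),
    pvAltLoop_eq n1 n2 (min n1 n2) (by omega) (by omega) (min n1 n2) (le_refl _)]
  have hr : PySem.List.pyRange 0 (((min n1 n2 : Nat) : Int) + 1) 1
      = (List.range (min n1 n2 + 1)).map (Nat.cast : Nat → Int) := by
    have h : (((min n1 n2 : Nat) : Int) + 1) = ((min n1 n2 + 1 : Nat) : Int) := by push_cast; ring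
    rw [h, PySem.List.pyRange_zero_natCast]
  rw [hr, List.map_map]
  apply List.map_congr_left
  intro t ht
  simp only [List.mem_range] at ht
  simp only [Function.comp]
  have htt : ((t : Int)).toNat = t := by omega
  rw [htt]
  have g1 : ((List.range (min n1 n2 + 1)).map (fun k => (n1.choose k : Int))).getD t 0
      = (n1.choose t : Int) := by
    rw [List.getD_eq_getElem _ _ (by simpa using ht)]
    simp
  have g2 : ((List.range (min n1 n2 + 1)).map (fun k => (n2.choose k : Int))).getD t 0
      = (n2.choose t : Int) := by
    rw [List.getD_eq_getElem _ _ (by simpa using ht)]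
    simp
  rw [g1, g2]
  push_cast
  ring
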